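-- pv_equiv track=rewrite | github.com/stalactitecorp/Quantitative-Finance | contact.py | find_most_viral
-- ===== SOURCE A (Python) =====
-- def find_most_viral(contacts_dic):
--
--     maximum_contacts = max([len(x) for x in list(contacts_dic.values())])
--     return sorted([x for x in list(contacts_dic.keys()) if len(contacts_dic[str(x)]) == maximum_contacts])
--
--
--     """Return the most viral contacts: those sick people with the largest
--     contact list
--
--     Args:
--         contacts_dic (dic): each entry is a sick person's name and their list
--         of contacts.
--
--     Returns:
--         list: contains the names of sick people who have the largest contact
--         lists
--     """
-- ===== SOURCE B (Python) =====
-- def find_most_viral(contacts_dic):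
--     best = -1
--     names = []
--     for name, contacts in contacts_dic.items():
--         n = len(contacts)
--         if n > best:
--             best = n
--             names = [name]
--         elif n == best:
--             names.append(name)
--     return sorted(names)
-- ===== Notes on version B (the rewrite author's own statement) =====
-- stated objective: alternative
-- what changed: A scans the dict twice (max of all value lengths, then a filter that re-looks every key up in the dict); B keeps a running maximum and the current bucket of maximal names in one pass with no dict lookups, then sorts the bucket; same overall cost, dominated by the final sort.
import Mathlib
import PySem

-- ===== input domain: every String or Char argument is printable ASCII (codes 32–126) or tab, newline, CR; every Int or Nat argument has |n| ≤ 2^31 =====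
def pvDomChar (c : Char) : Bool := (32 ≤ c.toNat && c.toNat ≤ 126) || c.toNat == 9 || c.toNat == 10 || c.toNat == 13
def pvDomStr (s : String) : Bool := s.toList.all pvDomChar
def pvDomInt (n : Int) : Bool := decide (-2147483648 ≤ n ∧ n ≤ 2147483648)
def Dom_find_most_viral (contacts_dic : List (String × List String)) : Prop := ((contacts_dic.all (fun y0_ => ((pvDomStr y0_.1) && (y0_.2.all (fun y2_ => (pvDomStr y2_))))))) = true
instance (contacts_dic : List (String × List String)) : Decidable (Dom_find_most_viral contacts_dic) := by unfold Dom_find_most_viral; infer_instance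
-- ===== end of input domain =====

-- B replaces A's two scans (max of all lengths, then a filter re-looking every key up)
-- by one pass that keeps the running maximum and its bucket of maximal names (same cost; the sort dominates).

-- ===== PORT A =====
-- maximum_contacts = max([len(x) for x in list(contacts_dic.values())]); on the empty
-- dict Python raises ValueError (max? = none, excluded by Pre_), ported as returning [].
def find_most_viral (contacts_dic : List (String × List String)) : List String :=
  match PySem.List.max? (contacts_dic.map (fun x => (x.2.length : Int))) (fun y => y) with
  | none => []
  | some maximum_contacts =>
      -- sorted([x for x in keys if len(contacts_dic[str(x)]) == maximum_contacts]);
      -- str(x) = x for the string keys; x comes from keys so the lookup never misses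
      -- (getD [] is unreachable there).
      PySem.List.sorted
        ((contacts_dic.map Prod.fst).filter
          (fun x => (((PySem.Dict.mk contacts_dic).get? x).getD []).length == maximum_contacts))
        (fun y => y) false

-- ===== PORT B =====
def find_most_viral_alt (contacts_dic : List (String × List String)) : List String :=
  let r := contacts_dic.foldl
    (fun (acc : Int × List String) p =>
      let n : Int := p.2.length
      if n > acc.1 then (n, [p.1])
      else if n = acc.1 then (acc.1, acc.2 ++ [p.1])
      else acc)
    ((-1 : Int), ([] : List String))
  PySem.List.sorted r.2 (fun y => y) false

-- ===== PRECONDITION & SPEC =====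
-- Pre_ excludes the empty dict, on which A raises ValueError (max of an empty list),
-- and association lists with duplicate keys, which represent no Python dict at all
-- (a dict's keys are unique, so A is never run on such an input).
def Pre_find_most_viral (contacts_dic : List (String × List String)) : Prop :=
  contacts_dic ≠ [] ∧ (contacts_dic.map Prod.fst).Nodup
instance (contacts_dic : List (String × List String)) : Decidable (Pre_find_most_viral contacts_dic) := by unfold Pre_find_most_viral; infer_instance
def pvWitness_find_most_viral : (List (String × List String)) := [("ann", ["bob", "cev"]), ("bob", ["ann"])]

def Spec_find_most_viral (contacts_dic : List (String × List String)) (out : List String) : Prop := out = find_most_viral_alt contacts_dic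
instance (contacts_dic : List (String × List String)) (out : List String) : Decidable (Spec_find_most_viral contacts_dic out) := by unfold Spec_find_most_viral; infer_instance

-- ===== CLAIM (what is proved, stated in full; the proofs are below) =====
def Claim_equal_find_most_viral : Prop := ∀ (contacts_dic : List (String × List String)), Dom_find_most_viral contacts_dic → Pre_find_most_viral contacts_dic → Spec_find_most_viral contacts_dic (find_most_viral contacts_dic)

-- ===== LEMMAS AND PROOFS =====

-- B's loop body, named for the proofs.
def fmvStep (acc : Int × List String) (p : String × List String) : Int × List String :=
  let n : Int := p.2.length
  if n > acc.1 then (n, [p.1])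
  else if n = acc.1 then (acc.1, acc.2 ++ [p.1])
  else acc

theorem fmvStep_eq (l : List (String × List String)) (acc : Int × List String) :
    l.foldl (fun (acc : Int × List String) p =>
      let n : Int := p.2.length
      if n > acc.1 then (n, [p.1])
      else if n = acc.1 then (acc.1, acc.2 ++ [p.1])
      else acc) acc = l.foldl fmvStep acc := rfl

-- a running max never drops below its start
theorem fmv_foldl_max_le (t : List (String × List String)) :
    ∀ a : Int, a ≤ t.foldl (fun a p => max a (p.2.length : Int)) a := by
  induction t with
  | nil => intro a; simp
  | cons q u ihu =>
    intro a
    rw [List.foldl_cons]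
    exact le_trans (le_max_left _ _) (ihu _)

-- Characterisation of B's loop: running maximum, and the names of the entries
-- attaining it (the carried bucket survives iff the maximum does not grow).
theorem fmvLoop_char (l : List (String × List String)) :
    ∀ (b : Int) (ns : List String),
      l.foldl fmvStep (b, ns) =
        ((l.foldl (fun a p => max a (p.2.length : Int)) b),
         (if b = l.foldl (fun a p => max a (p.2.length : Int)) b then ns else []) ++
           (l.filter (fun p => ((p.2.length : Int) == l.foldl (fun a p => max a (p.2.length : Int)) b))).map Prod.fst) := by
  induction l with
  | nil => intro b ns; simp
  | cons p t ih =>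
    intro b ns
    rw [List.foldl_cons, List.foldl_cons, List.filter_cons]
    by_cases h1 : ((p.2.length : Int) > b)
    · have hs : fmvStep (b, ns) p = ((p.2.length : Int), [p.1]) := by
        simp only [fmvStep]
        rw [if_pos h1]
      have hb : max b (p.2.length : Int) = (p.2.length : Int) := max_eq_right (le_of_lt h1)
      have hblt : b < t.foldl (fun a p => max a (p.2.length : Int)) ((p.2.length : Int)) :=
        lt_of_lt_of_le h1 (fmv_foldl_max_le t _)
      rw [hs, ih, hb]
      rw [if_neg (ne_of_lt hblt), List.nil_append]
      by_cases h2 : ((p.2.length : Int) = t.foldl (fun a p => max a (p.2.length : Int)) ((p.2.length : Int)))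
      · rw [if_pos h2, if_pos (beq_iff_eq.mpr h2), List.singleton_append, List.map_cons]
      · rw [if_neg h2, if_neg (by simpa using h2), List.nil_append]
    · have hb : max b (p.2.length : Int) = b := max_eq_left (not_lt.mp h1)
      by_cases h2 : ((p.2.length : Int) = b)
      · have hs : fmvStep (b, ns) p = (b, ns ++ [p.1]) := by
          simp only [fmvStep]
          rw [if_neg h1, if_pos h2]
        rw [hs, ih, hb]
        by_cases h3 : b = t.foldl (fun a p => max a (p.2.length : Int)) b
        · rw [if_pos h3, if_pos h3, if_pos (beq_iff_eq.mpr (h2.trans h3)), List.map_cons]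
          rw [List.append_assoc, List.singleton_append]
        · have h4 : ¬ ((p.2.length : Int)
              == t.foldl (fun a p => max a (p.2.length : Int)) b) = true := by
            simpa [h2] using h3
          rw [if_neg h3, if_neg h3, if_neg h4]
      · have h5 : (p.2.length : Int) < b := lt_of_le_of_ne (not_lt.mp h1) h2
        have hs : fmvStep (b, ns) p = (b, ns) := by
          simp only [fmvStep]
          rw [if_neg h1, if_neg h2]
        rw [hs, ih, hb]
        have h6 : ¬ ((p.2.length : Int)
            == t.foldl (fun a p => max a (p.2.length : Int)) b) = true := by
          simp only [beq_iff_eq]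
          intro hc
          exact absurd (hc ▸ lt_of_lt_of_le h5 (fmv_foldl_max_le t b)) (lt_irrefl _)
        rw [if_neg h6]

-- Under unique keys, filtering the keys by a predicate on their dict lookup is
-- filtering the entries by the same predicate on their own value.
theorem fmv_filter_keys (P : Option (List String) → Bool) :
    ∀ (l : List (String × List String)), (l.map Prod.fst).Nodup →
      (l.map Prod.fst).filter (fun x => P ((PySem.Dict.mk l).get? x)) =
        (l.filter (fun p => P (some p.2))).map Prod.fst := by
  intro l
  induction l with
  | nil => intro _; rfl
  | cons p t ih =>
    obtain ⟨k, v⟩ := p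
    intro hnd
    simp only [List.map_cons, List.nodup_cons] at hnd
    obtain ⟨hp, ht⟩ := hnd
    have hself : (PySem.Dict.mk ((k, v) :: t)).get? k = some v := by
      rw [PySem.Dict.get?_mk_cons, if_pos (beq_self_eq_true k)]
    have hrest : (t.map Prod.fst).filter (fun x => P ((PySem.Dict.mk ((k, v) :: t)).get? x)) =
        (t.map Prod.fst).filter (fun x => P ((PySem.Dict.mk t).get? x)) := by
      apply List.filter_congr
      intro x hx
      have hxne : ¬ (k == x) = true := by
        intro hc
        exact hp (beq_iff_eq.mp hc ▸ hx)
      rw [PySem.Dict.get?_mk_cons, if_neg hxne]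
    rw [List.map_cons, List.filter_cons, List.filter_cons, hself]
    by_cases hP : P (some v) = true
    · rw [if_pos hP, if_pos hP, List.map_cons, hrest, ih ht]
    · rw [if_neg hP, if_neg hP, hrest, ih ht]

-- The bucket start -1 is strictly below every length, so the carried-empty branch
-- of fmvLoop_char always fires on a nonempty list.
theorem fmv_neg_one_lt (l : List (String × List String)) (h : l ≠ []) :
    (-1 : Int) < l.foldl (fun a p => max a (p.2.length : Int)) (-1) := by
  match l, h with
  | p :: t, _ =>
    rw [List.foldl_cons]
    have h0 : (0 : Int) ≤ max (-1) (p.2.length : Int) :=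
      le_max_of_le_right (Int.natCast_nonneg _)
    calc (-1 : Int) < 0 := by norm_num
      _ ≤ max (-1) (p.2.length : Int) := h0
      _ ≤ _ := fmv_foldl_max_le t _

-- A's max over the value lengths equals B's running maximum from -1.
theorem fmv_max_eq (l : List (String × List String)) (h : l ≠ []) :
    PySem.List.max? (l.map (fun x => (x.2.length : Int))) (fun y => y) =
      some (l.foldl (fun a p => max a (p.2.length : Int)) (-1)) := by
  match l, h with
  | p :: t, _ =>
    rw [List.map_cons, PySem.List.max?_id_cons, List.foldl_map, List.foldl_cons]
    have hmax : max (-1 : Int) (p.2.length : Int) = (p.2.length : Int) :=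
      max_eq_right (le_trans (by norm_num) (Int.natCast_nonneg _))
    rw [hmax]

-- ===== VERDICT (by name: the statement is the Claim_ definition above) =====
theorem find_most_viral_spec : Claim_equal_find_most_viral := by
  intro l _ hpre
  obtain ⟨hne, hnd⟩ := hpre
  unfold Spec_find_most_viral find_most_viral find_most_viral_alt
  rw [fmv_max_eq l hne]
  rw [fmvStep_eq, fmvLoop_char]
  have hlt := fmv_neg_one_lt l hne
  rw [if_neg (ne_of_lt hlt), List.nil_append]
  have hfk := fmv_filter_keys
    (fun o => (((o.getD []).length : Int) == l.foldl (fun a p => max a (p.2.length : Int)) (-1)))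
    l hnd
  simp only [Option.getD_some] at hfk
  exact congrArg (fun xs => PySem.List.sorted xs (fun y => y) false) hfk
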